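-- pv_equiv track=rewrite | github.com/finops360/bq-analysis | bigquery_optimizer/analysis/heuristic_analyzer.py | _find_partition_candidates
-- ===== SOURCE A (Python) =====
-- from typing import List, Dict, Any, Optional, Tuple
--
-- def _find_partition_candidates(schema_fields: List[Dict[str, Any]]) -> List[str]:
--     """
--     Find potential columns suitable for partitioning
--
--     Args:
--         schema_fields: List of schema field dictionaries
--
--     Returns:
--         List of potential partition column names
--     """
--     potential_columns = []
--
--     for field in schema_fields:
--         field_type = field.get("type", "")
--         field_name = field.get("name", "")
--
--         # Look for date/timestamp type fields
--         if field_type in ["DATE", "TIMESTAMP", "DATETIME"]: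
--             # Priority for date-related columns
--             score = 0
--
--             # Prefer columns with date in the name
--             if any(keyword in field_name.lower() for keyword in
--                    ["date", "time", "day", "month", "year", "created", "modified", "updated"]):
--                 score += 2
--
--             # Add field with score (for sorting)
--             potential_columns.append((field_name, score))
--
--     # Sort by score (descending)
--     potential_columns.sort(key=lambda x: x[1], reverse=True)
--
--     # Return column names only
--     return [col[0] for col in potential_columns]
-- ===== SOURCE B (Python) =====
-- def _find_partition_candidates(schema_fields):
--     """Single pass, two buckets: keyword-named date columns first, the rest after.
--
--     Same result as the score+stable-sort version, without building scored
--     tuples or sorting.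
--     """
--     priority = []
--     others = []
--     for field in schema_fields:
--         if field.get("type", "") in ("DATE", "TIMESTAMP", "DATETIME"):
--             name = field.get("name", "")
--             lowered = name.lower()
--             if any(k in lowered for k in
--                    ("date", "time", "day", "month", "year", "created", "modified", "updated")):
--                 priority.append(name)
--             else:
--                 others.append(name)
--     return priority + others
-- ===== Notes on version B (the rewrite author's own statement) =====
-- stated objective: simpler
-- what changed: Replaced the scored-tuple accumulation plus stable descending sort with a single-pass two-bucket partition (keyword-named fields, then the rest) returned as priority + others, eliminating the sort and the score bookkeeping.
import Mathlib
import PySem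

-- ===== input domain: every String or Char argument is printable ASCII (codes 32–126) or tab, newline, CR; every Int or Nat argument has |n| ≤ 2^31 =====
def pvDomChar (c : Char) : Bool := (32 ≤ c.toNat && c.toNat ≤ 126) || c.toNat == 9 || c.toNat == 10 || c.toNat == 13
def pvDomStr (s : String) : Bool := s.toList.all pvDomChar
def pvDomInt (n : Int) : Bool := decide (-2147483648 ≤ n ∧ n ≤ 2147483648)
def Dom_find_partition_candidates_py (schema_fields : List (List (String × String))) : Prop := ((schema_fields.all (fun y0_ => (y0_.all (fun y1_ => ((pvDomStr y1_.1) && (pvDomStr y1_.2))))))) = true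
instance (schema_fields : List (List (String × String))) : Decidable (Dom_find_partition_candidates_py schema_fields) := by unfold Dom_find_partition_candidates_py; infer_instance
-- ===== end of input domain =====

-- B replaces A's scored tuples + stable descending sort by a one-pass two-bucket
-- partition (simpler; same return value).

-- ===== PORT A =====
-- literal port of A: build (name, score) pairs for date-typed fields, sort by
-- score descending (stable), return the names
def find_partition_candidates_py (schema_fields : List (List (String × String))) : List String :=
  let potential_columns : List (String × Int) :=
    schema_fields.foldl (fun acc field =>
      let field_type := PySem.Dict.getD (PySem.Dict.ofList field) "type" ""
      let field_name := PySem.Dict.getD (PySem.Dict.ofList field) "name" ""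
      if ["DATE", "TIMESTAMP", "DATETIME"].contains field_type then
        let score : Int := 0
        let score :=
          if (["date", "time", "day", "month", "year", "created", "modified", "updated"]).any
               (fun keyword => PySem.Str.isIn keyword (PySem.Str.lower field_name)) then
            score + 2
          else score
        acc ++ [(field_name, score)]
      else acc) []
  (PySem.List.sorted potential_columns (fun x => x.2) true).map (fun col => col.1)

-- ===== PORT B =====
-- B-side helper: does the lowercased name contain a date-like keyword?
def pvIsDateNamed (field_name : String) : Bool :=
  (["date", "time", "day", "month", "year", "created", "modified", "updated"]).any
    (fun keyword => PySem.Str.isIn keyword (PySem.Str.lower field_name))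

def find_partition_candidates_py_alt (schema_fields : List (List (String × String))) : List String :=
  let r : List String × List String :=
    schema_fields.foldl (fun acc field =>
      if ["DATE", "TIMESTAMP", "DATETIME"].contains (PySem.Dict.getD (PySem.Dict.ofList field) "type" "") then
        let name := PySem.Dict.getD (PySem.Dict.ofList field) "name" ""
        if pvIsDateNamed name then (acc.1 ++ [name], acc.2)
        else (acc.1, acc.2 ++ [name])
      else acc) ([], [])
  r.1 ++ r.2

-- ===== PRECONDITION & SPEC =====
def Spec_find_partition_candidates_py (schema_fields : List (List (String × String))) (out : List String) : Prop := out = find_partition_candidates_py_alt schema_fields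
instance (schema_fields : List (List (String × String))) (out : List String) : Decidable (Spec_find_partition_candidates_py schema_fields out) := by unfold Spec_find_partition_candidates_py; infer_instance

-- ===== CLAIM (what is proved, stated in full; the proofs are below) =====
def Claim_equal_find_partition_candidates_py : Prop := ∀ (schema_fields : List (List (String × String))), Dom_find_partition_candidates_py schema_fields → Spec_find_partition_candidates_py schema_fields (find_partition_candidates_py schema_fields)

-- ===== LEMMAS AND PROOFS =====

-- insert x between a prefix it does not go before and a suffix it goes before
theorem pv_insertBy_middle {α : Type} (before : α → α → Bool) (x : α) (l1 l2 : List α)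
    (h1 : ∀ y ∈ l1, before x y = false) (h2 : ∀ y ∈ l2, before x y = true) :
    PySem.List.insertBy before x (l1 ++ l2) = l1 ++ x :: l2 := by
  induction l1 with
  | nil =>
    cases l2 with
    | nil => simp [PySem.List.insertBy]
    | cons h t => simp [PySem.List.insertBy, h2 h (by simp)]
  | cons a l1 ih =>
    have ha : before x a = false := h1 a (by simp)
    simp only [List.cons_append, PySem.List.insertBy, ha]
    simp [ih (fun y hy => h1 y (by simp [hy]))]

-- stable descending sort of a 0/2-scored list = the 2-scored part then the 0-scored part
theorem pv_sorted_two_zero (L : List (String × Int)) (h : ∀ x ∈ L, x.2 = 0 ∨ x.2 = 2) :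
    PySem.List.sorted L (fun x => x.2) true
      = L.filter (fun x => x.2 == 2) ++ L.filter (fun x => x.2 == 0) := by
  rw [PySem.List.sorted_rev_eq_foldl_insertBy]
  induction L using List.reverseRecOn with
  | nil => simp
  | append_singleton L x ih =>
    rw [List.foldl_append]
    rw [ih (fun y hy => h y (by simp [hy]))]
    simp only [List.foldl_cons, List.foldl_nil, List.filter_append, List.filter_cons,
      List.filter_nil]
    rcases h x (by simp) with h0 | h2
    · rw [PySem.List.insertBy_of_forall_not_before]
      · simp [h0]
      · intro y hy
        rcases List.mem_append.mp hy with hy | hy <;>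
          rcases h y (List.mem_append.mpr (Or.inl (List.mem_filter.mp hy).1)) with hz | hz <;>
          simp [h0, hz]
    · rw [pv_insertBy_middle]
      · simp [h2]
      · intro y hy
        have := (List.mem_filter.mp hy).2
        simp only [beq_iff_eq] at this
        simp [h2, this]
      · intro y hy
        have := (List.mem_filter.mp hy).2
        simp only [beq_iff_eq] at this
        simp [h2, this]

-- ===== VERDICT (by name: the statement is the Claim_ definition above) =====
set_option maxHeartbeats 1000000 in
theorem find_partition_candidates_py_spec : Claim_equal_find_partition_candidates_py := by
  intro schema_fields _
  unfold Spec_find_partition_candidates_py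
  unfold find_partition_candidates_py find_partition_candidates_py_alt
  -- notation for the per-field data
  set p : List (String × String) → Bool :=
    fun field => ["DATE", "TIMESTAMP", "DATETIME"].contains (PySem.Dict.getD (PySem.Dict.ofList field) "type" "") with hp
  set nm : List (String × String) → String :=
    fun field => PySem.Dict.getD (PySem.Dict.ofList field) "name" "" with hnm
  -- A's loop builds (name, score) pairs for fields satisfying p
  have hA : schema_fields.foldl (fun acc field =>
      let field_type := PySem.Dict.getD (PySem.Dict.ofList field) "type" ""
      let field_name := PySem.Dict.getD (PySem.Dict.ofList field) "name" ""
      if ["DATE", "TIMESTAMP", "DATETIME"].contains field_type then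
        let score : Int := 0
        let score :=
          if (["date", "time", "day", "month", "year", "created", "modified", "updated"]).any
               (fun keyword => PySem.Str.isIn keyword (PySem.Str.lower field_name)) then
            score + 2
          else score
        acc ++ [(field_name, score)]
      else acc) []
      = (schema_fields.filter p).map
          (fun field => (nm field, if pvIsDateNamed (nm field) then (2 : Int) else 0)) := by
    have := PySem.List.foldl_append_if p
      (fun field => (nm field, if pvIsDateNamed (nm field) then (2 : Int) else 0))
      schema_fields []
    simpa [hp, hnm, pvIsDateNamed] using this
  -- B's loop is a componentwise pair of filtered appends
  have hB : schema_fields.foldl (fun (acc : List String × List String) field =>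
      if ["DATE", "TIMESTAMP", "DATETIME"].contains (PySem.Dict.getD (PySem.Dict.ofList field) "type" "") then
        let name := PySem.Dict.getD (PySem.Dict.ofList field) "name" ""
        if pvIsDateNamed name then (acc.1 ++ [name], acc.2)
        else (acc.1, acc.2 ++ [name])
      else acc) ([], [])
      = (((schema_fields.filter (fun f => p f && pvIsDateNamed (nm f))).map nm),
         ((schema_fields.filter (fun f => p f && !pvIsDateNamed (nm f))).map nm)) := by
    have hstep : (fun (acc : List String × List String) field =>
        if ["DATE", "TIMESTAMP", "DATETIME"].contains (PySem.Dict.getD (PySem.Dict.ofList field) "type" "") then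
          let name := PySem.Dict.getD (PySem.Dict.ofList field) "name" ""
          if pvIsDateNamed name then (acc.1 ++ [name], acc.2)
          else (acc.1, acc.2 ++ [name])
        else acc)
        = (fun (acc : List String × List String) field =>
           ((fun a f => if (p f && pvIsDateNamed (nm f)) = true then a ++ [nm f] else a) acc.1 field,
            (fun a f => if (p f && !pvIsDateNamed (nm f)) = true then a ++ [nm f] else a) acc.2 field)) := by
      funext acc field
      by_cases h1 : p field = true <;> by_cases h2 : pvIsDateNamed (nm field) = true <;>
        simp [hp, hnm] at * <;> simp [h1, h2]
    rw [hstep, PySem.List.foldl_prod_mk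
         (fun (a : List String) f => if (p f && pvIsDateNamed (nm f)) = true then a ++ [nm f] else a)
         (fun (a : List String) f => if (p f && !pvIsDateNamed (nm f)) = true then a ++ [nm f] else a)
         schema_fields [] []]
    rw [PySem.List.foldl_append_if (fun f => p f && pvIsDateNamed (nm f)) nm schema_fields []]
    rw [PySem.List.foldl_append_if (fun f => p f && !pvIsDateNamed (nm f)) nm schema_fields []]
    simp
  simp only [hA, hB]
  -- sort the 0/2-scored list and push map/filter through
  rw [pv_sorted_two_zero _ (by
    intro x hx
    rcases List.mem_map.mp hx with ⟨f, _, rfl⟩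
    by_cases h : pvIsDateNamed (nm f) = true <;> simp [h])]
  simp only [List.map_append, List.filter_map, List.map_map, List.filter_filter]
  congr 1 <;>
  · congr 1
    apply List.filter_congr
    intro f _
    by_cases h : pvIsDateNamed (nm f) = true <;>
      simp [Function.comp, h, Bool.and_comm]
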